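-- pv_equiv track=rewrite | github.com/oshea00/euler | Squares.py | pathWalkSquare
-- ===== SOURCE A (Python) =====
-- cols=5
--
-- graph = {
-- 	0 : [1,5],
-- 	1 : [0,2,6],
-- 	2 : [1,3],
-- 	3 : [2,4,8],
-- 	4 : [3,9],
-- 	5 : [0,6,10],
-- 	6 : [1,5,7,11],
-- 	7 : [6,8,12],
-- 	8 : [3,7,9,13],
-- 	9 : [4,8,14],
-- 	10 : [5,15],
-- 	11 : [6,12,16],
-- 	12 : [7,11,13,17],
-- 	13 : [8,12,18],
-- 	14 : [9,19],
-- 	15 : [10,16,20],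
-- 	16 : [11,15,17,21],
-- 	17 : [12,16,18],
-- 	18 : [13,17,19,23],
-- 	19 : [14,18,24],
-- 	20 : [15,21],
-- 	21 : [16,20,22],
-- 	22 : [21,23],
-- 	23 : [18,22,24],
-- 	24 : [19,23]
-- }
--
-- def getDirectionOffset(dir,dist):
-- 	if dir == 1: # N
-- 		return (0,-dist)
-- 	if dir == 2: # W
-- 		return (-dist,0)
-- 	if dir == 3: # S
-- 		return (0,dist)
-- 	if dir == 4: # E
-- 		return (dist,0)
-- 	return (cols,cols)
--
-- def isInbounds(row,col,dist,dir):
-- 	coloff, rowoff = getDirectionOffset(dir,dist)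
-- 	if not 0 <= row + rowoff < cols:
-- 		return False
-- 	if not 0 <= col + coloff < cols:
-- 		return False
-- 	return True
--
-- def isSquarePossibleAt(row,col,size):
-- 	for dir in range(1,5):
-- 		coloff, rowoff = getDirectionOffset(dir,size)
-- 		if not isInbounds(row,col,size,dir):
-- 			return False
-- 		row += rowoff
-- 		col += coloff
-- 	return True
--
-- def pathWalkSquare(row,col,size):
-- 	path = []
-- 	if isSquarePossibleAt(row,col,size):
-- 		for dir in range(1,5):
-- 			coloff, rowoff = getDirectionOffset(dir,1)
-- 			for _ in range(0,size):
-- 				node1 = row*cols+col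
-- 				node2 = (row+rowoff)*cols+(col+coloff)
-- 				if not node1 in graph[node2]:
-- 					return []
-- 				path.append(node1)
-- 				row += rowoff
-- 				col += coloff
-- 		return path
-- 	return []
-- ===== SOURCE B (Python) =====
-- cols = 5
--
-- def pathWalkSquare(row, col, size):
-- 	# Closed-form: decide validity by arithmetic on the square's corners
-- 	# (bounds + the four grid walls, as geometric edges, against the
-- 	# perimeter), then emit the path directly with four comprehensions.
-- 	if size <= 0:
-- 		return []
-- 	top, left = row - size, col - size
-- 	if not (0 <= top and row < cols and 0 <= left and col < cols):
-- 		return []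
-- 	# vertical walls: between (r,c) and (r+1,c)
-- 	for r, c in ((0, 2), (3, 2)):
-- 		if (c == col or c == left) and top <= r and r + 1 <= row:
-- 			return []
-- 	# horizontal walls: between (r,c) and (r,c+1)
-- 	for r, c in ((2, 0), (2, 3)):
-- 		if (r == row or r == top) and left <= c and c + 1 <= col:
-- 			return []
-- 	return ([(row - i) * cols + col for i in range(size)]
-- 		+ [top * cols + (col - i) for i in range(size)]
-- 		+ [(top + i) * cols + left for i in range(size)]
-- 		+ [row * cols + (left + i) for i in range(size)])
-- ===== Notes on version B (the rewrite author's own statement) =====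
-- stated objective: alternative
-- what changed: B replaces A's step-by-step walk over an adjacency dict (pre-pass validation then re-walk) by a closed-form geometric test: O(1) arithmetic on the square's corners plus four wall-edge-on-perimeter checks, then the path is emitted directly with four range comprehensions.
import Mathlib
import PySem

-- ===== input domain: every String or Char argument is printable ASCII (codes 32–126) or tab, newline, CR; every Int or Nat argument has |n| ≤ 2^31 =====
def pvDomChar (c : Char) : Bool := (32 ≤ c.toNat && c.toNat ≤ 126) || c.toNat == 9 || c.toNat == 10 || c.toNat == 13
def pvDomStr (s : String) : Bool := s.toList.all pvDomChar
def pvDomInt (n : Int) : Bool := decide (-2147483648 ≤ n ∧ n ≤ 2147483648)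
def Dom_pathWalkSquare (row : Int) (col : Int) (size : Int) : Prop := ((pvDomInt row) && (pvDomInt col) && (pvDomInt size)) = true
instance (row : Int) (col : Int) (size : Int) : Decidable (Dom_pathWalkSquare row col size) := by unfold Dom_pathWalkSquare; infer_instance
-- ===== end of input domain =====

-- B replaces A's step-by-step walk over an adjacency dict by a closed-form geometric
-- validity test on the square's corners plus direct construction of the path; objective: alternative.

-- ===== PORT A =====
def graphA : PySem.Dict Int (List Int) := PySem.Dict.ofList
  [(0,[1,5]), (1,[0,2,6]), (2,[1,3]), (3,[2,4,8]), (4,[3,9]),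
   (5,[0,6,10]), (6,[1,5,7,11]), (7,[6,8,12]), (8,[3,7,9,13]), (9,[4,8,14]),
   (10,[5,15]), (11,[6,12,16]), (12,[7,11,13,17]), (13,[8,12,18]), (14,[9,19]),
   (15,[10,16,20]), (16,[11,15,17,21]), (17,[12,16,18]), (18,[13,17,19,23]), (19,[14,18,24]),
   (20,[15,21]), (21,[16,20,22]), (22,[21,23]), (23,[18,22,24]), (24,[19,23])]

def getDirectionOffset (dir : Int) (dist : Int) : Int × Int :=
  if dir = 1 then (0, -dist)
  else if dir = 2 then (-dist, 0)
  else if dir = 3 then (0, dist)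
  else if dir = 4 then (dist, 0)
  else (5, 5)

def isInbounds (row col dist dir : Int) : Bool :=
  let off := getDirectionOffset dir dist
  if ¬ (0 ≤ row + off.2 ∧ row + off.2 < 5) then false
  else if ¬ (0 ≤ col + off.1 ∧ col + off.1 < 5) then false
  else true

-- the for-loop with early `return False`, as recursion over the dir list
def isqAux (size : Int) : List Int → Int → Int → Bool
  | [], _, _ => true
  | dir :: rest, row, col =>
    let off := getDirectionOffset dir size
    if ¬ isInbounds row col size dir then false
    else isqAux size rest (row + off.2) (col + off.1)

def isSquarePossibleAt (row col size : Int) : Bool :=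
  isqAux size [1, 2, 3, 4] row col

-- inner `for _ in range(0,size)` with early `return []` (signalled as none)
-- graph[node2] is only reached with node2 ∈ 0..24, a key of graphA, so getD [] is exact there
def walkLeg (rowoff coloff : Int) : List Int → Int → Int → List Int → Option (Int × Int × List Int)
  | [], r, c, p => some (r, c, p)
  | _ :: rest, r, c, p =>
    let node1 := r * 5 + c
    let node2 := (r + rowoff) * 5 + (c + coloff)
    if node1 ∈ (graphA.get? node2).getD [] then
      walkLeg rowoff coloff rest (r + rowoff) (c + coloff) (p ++ [node1])
    else none

def walkDirs (size : Int) : List Int → Int → Int → List Int → Option (Int × Int × List Int)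
  | [], r, c, p => some (r, c, p)
  | dir :: rest, r, c, p =>
    let off := getDirectionOffset dir 1
    match walkLeg off.2 off.1 (PySem.List.pyRange 0 size 1) r c p with
    | none => none
    | some (r', c', p') => walkDirs size rest r' c' p'

def pathWalkSquare (row : Int) (col : Int) (size : Int) : List Int :=
  if isSquarePossibleAt row col size then
    match walkDirs size [1, 2, 3, 4] row col [] with
    | some (_, _, p) => p
    | none => []
  else []

-- ===== PORT B =====
-- Source B's `for r,c in ((0,2),(3,2))` early-return loop: does some vertical wall hit the perimeter?
def vWallHit (row col top left : Int) : Bool :=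
  [((0 : Int), (2 : Int)), (3, 2)].any
    (fun rc => (rc.2 = col ∨ rc.2 = left) ∧ top ≤ rc.1 ∧ rc.1 + 1 ≤ row)

-- Source B's `for r,c in ((2,0),(2,3))` loop: does some horizontal wall hit the perimeter?
def hWallHit (row col top left : Int) : Bool :=
  [((2 : Int), (0 : Int)), (2, 3)].any
    (fun rc => (rc.1 = row ∨ rc.1 = top) ∧ left ≤ rc.2 ∧ rc.2 + 1 ≤ col)

def pathWalkSquare_alt (row : Int) (col : Int) (size : Int) : List Int :=
  if size ≤ 0 then []
  else
    let top := row - size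
    let left := col - size
    if ¬ (0 ≤ top ∧ row < 5 ∧ 0 ≤ left ∧ col < 5) then []
    else if vWallHit row col top left then []
    else if hWallHit row col top left then []
    else
      ((List.range size.toNat).map (fun i => (row - i) * 5 + col))
      ++ ((List.range size.toNat).map (fun i => top * 5 + (col - i)))
      ++ ((List.range size.toNat).map (fun i => (top + i) * 5 + left))
      ++ ((List.range size.toNat).map (fun i => row * 5 + (left + i)))

-- ===== PRECONDITION & SPEC =====
def Spec_pathWalkSquare (row : Int) (col : Int) (size : Int) (out : List Int) : Prop := out = pathWalkSquare_alt row col size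
instance (row : Int) (col : Int) (size : Int) (out : List Int) : Decidable (Spec_pathWalkSquare row col size out) := by unfold Spec_pathWalkSquare; infer_instance

-- ===== CLAIM (what is proved, stated in full; the proofs are below) =====
def Claim_equal_pathWalkSquare : Prop := ∀ (row : Int) (col : Int) (size : Int), Dom_pathWalkSquare row col size → Spec_pathWalkSquare row col size (pathWalkSquare row col size)

-- ===== LEMMAS AND PROOFS =====

-- size ≤ 0: A makes no step and returns []
theorem a_nonpos (row col size : Int) (h : size ≤ 0) : pathWalkSquare row col size = [] := by
  have hr : PySem.List.pyRange 0 size 1 = [] := PySem.List.pyRange_one_eq_nil (by omega)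
  simp [pathWalkSquare, walkDirs, hr, walkLeg]

-- A's pre-pass implies the start corner is in bounds and size ≤ row
theorem prepass_bounds (row col size : Int) (h : isSquarePossibleAt row col size = true) :
    0 ≤ row ∧ row < 5 ∧ 0 ≤ col ∧ col < 5 ∧ size ≤ row := by
  simp [isSquarePossibleAt, isqAux, isInbounds, getDirectionOffset] at h
  omega

-- ===== VERDICT (by name: the statement is the Claim_ definition above) =====
theorem pathWalkSquare_spec : Claim_equal_pathWalkSquare := by
  intro row col size _
  unfold Spec_pathWalkSquare
  rcases le_or_gt size 0 with hs | hs
  · rw [a_nonpos _ _ _ hs]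
    simp [pathWalkSquare_alt, hs]
  · by_cases hok : 0 ≤ row ∧ row < 5 ∧ 0 ≤ col ∧ col < 5 ∧ size ≤ 4
    · obtain ⟨h1, h2, h3, h4, h5⟩ := hok
      interval_cases row <;> interval_cases col <;> interval_cases size <;> decide
    · -- A's pre-pass fails, and B's bounds test fails too
      have hA : pathWalkSquare row col size = [] := by
        unfold pathWalkSquare
        split
        · rename_i hp
          have := prepass_bounds row col size hp
          omega
        · rfl
      have hB : pathWalkSquare_alt row col size = [] := by
        unfold pathWalkSquare_alt
        rw [if_neg (by omega)]
        rw [if_pos (by omega)]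
      rw [hA, hB]
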